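-- pv_equiv track=rewrite | github.com/rong-hash/ECE448_MP | mp1/search.py | min_h_open_node
-- ===== SOURCE A (Python) =====
-- def min_h_open_node(exploring_list, end_node, exploring_g):
--     f_list = []
--     for node in exploring_list:
--         h = abs(node[0] - end_node[0]) + abs(node[1] - end_node[1])
--         f = h + exploring_g[node]
--         f_list.append(f)
--     min_index = f_list.index(min(f_list))
--
--     return exploring_list.pop(min_index)
-- ===== SOURCE B (Python) =====
-- def min_h_open_node(exploring_list, end_node, exploring_g):
--     order = sorted(range(len(exploring_list)),
--                    key=lambda i: abs(exploring_list[i][0] - end_node[0])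
--                                  + abs(exploring_list[i][1] - end_node[1])
--                                  + exploring_g[exploring_list[i]])
--     return exploring_list.pop(order[0])
-- ===== Notes on version B (the rewrite author's own statement) =====
-- stated objective: alternative
-- what changed: B stable-sorts the index list by the A* f-value (decorate-sort-select) and pops the first index, replacing A's three sequential passes (build f-list, min(), .index()); stability makes the first minimum win on ties exactly as .index(min(...)) does.
import Mathlib
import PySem

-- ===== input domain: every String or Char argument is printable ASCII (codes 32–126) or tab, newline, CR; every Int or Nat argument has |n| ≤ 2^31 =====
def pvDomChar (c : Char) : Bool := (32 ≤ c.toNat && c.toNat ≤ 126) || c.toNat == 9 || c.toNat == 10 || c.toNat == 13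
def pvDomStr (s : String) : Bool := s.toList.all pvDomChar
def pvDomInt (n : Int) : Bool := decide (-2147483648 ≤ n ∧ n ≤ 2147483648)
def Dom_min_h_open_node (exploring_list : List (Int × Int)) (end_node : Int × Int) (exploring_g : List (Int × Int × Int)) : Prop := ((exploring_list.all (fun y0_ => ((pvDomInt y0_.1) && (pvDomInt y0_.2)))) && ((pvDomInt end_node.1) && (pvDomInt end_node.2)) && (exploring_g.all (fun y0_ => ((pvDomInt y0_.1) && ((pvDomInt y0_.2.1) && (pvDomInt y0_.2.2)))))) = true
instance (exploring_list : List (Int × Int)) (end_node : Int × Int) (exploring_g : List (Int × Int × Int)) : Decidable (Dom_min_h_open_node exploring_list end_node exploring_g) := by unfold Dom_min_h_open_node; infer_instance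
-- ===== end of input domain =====

-- B stable-sorts the index list by the A* f-value (decorate-sort-select) and pops the first index,
-- instead of A's three sequential passes (build f-list, min(), .index()); equivalence is about the
-- RETURN value, and both Pythons pop the same index from exploring_list, so the mutation agrees too.

-- dict subscript exploring_g[node]: first entry (a, b, v) of the association list with key (a, b) = node;
-- exact where the key is present (Pre_ requires it; a missing key is Python's KeyError).
def pvGval (g : List (Int × Int × Int)) (n : Int × Int) : Int :=
  ((g.find? (fun e => e.1 == n.1 && e.2.1 == n.2)).map (fun e => e.2.2)).getD 0

-- ===== PORT A =====
def min_h_open_node (exploring_list : List (Int × Int)) (end_node : Int × Int) (exploring_g : List (Int × Int × Int)) : Int × Int :=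
  let f_list := exploring_list.foldl
    (fun acc node => acc ++ [|node.1 - end_node.1| + |node.2 - end_node.2| + pvGval exploring_g node])
    ([] : List Int)
  match PySem.List.min? f_list (fun x => x) with
  | none => (0, 0)      -- min([]) raises ValueError; excluded by Pre_
  | some m =>
    match PySem.List.index? f_list m with
    | none => (0, 0)    -- unreachable: the minimum is a member
    | some i =>
      match PySem.List.pop? exploring_list (i : Int) with
      | some r => r.1
      | none => (0, 0)  -- unreachable in range

-- ===== PORT B =====
def min_h_open_node_alt (exploring_list : List (Int × Int)) (end_node : Int × Int) (exploring_g : List (Int × Int × Int)) : Int × Int :=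
  -- order = sorted(range(len(exploring_list)), key=lambda i: abs(..[i][0]-..) + abs(..[i][1]-..) + g[..[i]])
  match PySem.List.sorted (PySem.List.pyRange 0 (exploring_list.length : Int))
      (fun i => |(PySem.List.pyGetD exploring_list i (0, 0)).1 - end_node.1|
              + |(PySem.List.pyGetD exploring_list i (0, 0)).2 - end_node.2|
              + pvGval exploring_g (PySem.List.pyGetD exploring_list i (0, 0))) with
  | [] => (0, 0)        -- order[0] on the empty list raises IndexError; excluded by Pre_
  | i :: _ =>
    match PySem.List.pop? exploring_list i with
    | some r => r.1
    | none => (0, 0)    -- unreachable: i is an in-range index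

-- ===== PRECONDITION & SPEC =====
-- Pre_ excludes exactly the inputs where Python A raises: the empty list (min([]) is ValueError)
-- and a node of exploring_list missing from exploring_g (KeyError).
def Pre_min_h_open_node (exploring_list : List (Int × Int)) (end_node : Int × Int) (exploring_g : List (Int × Int × Int)) : Prop :=
  exploring_list ≠ [] ∧ ∀ n ∈ exploring_list, ∃ e ∈ exploring_g, e.1 = n.1 ∧ e.2.1 = n.2
instance (exploring_list : List (Int × Int)) (end_node : Int × Int) (exploring_g : List (Int × Int × Int)) : Decidable (Pre_min_h_open_node exploring_list end_node exploring_g) := by unfold Pre_min_h_open_node; infer_instance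
def pvWitness_min_h_open_node : (List (Int × Int)) × (Int × Int) × (List (Int × Int × Int)) :=
  ([(0, 0), (1, 2)], (1, 1), [(0, 0, 5), (1, 2, 0)])

def Spec_min_h_open_node (exploring_list : List (Int × Int)) (end_node : Int × Int) (exploring_g : List (Int × Int × Int)) (out : Int × Int) : Prop := out = min_h_open_node_alt exploring_list end_node exploring_g
instance (exploring_list : List (Int × Int)) (end_node : Int × Int) (exploring_g : List (Int × Int × Int)) (out : Int × Int) : Decidable (Spec_min_h_open_node exploring_list end_node exploring_g out) := by unfold Spec_min_h_open_node; infer_instance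

-- ===== CLAIM (what is proved, stated in full; the proofs are below) =====
def Claim_equal_min_h_open_node : Prop := ∀ (exploring_list : List (Int × Int)) (end_node : Int × Int) (exploring_g : List (Int × Int × Int)), Dom_min_h_open_node exploring_list end_node exploring_g → Pre_min_h_open_node exploring_list end_node exploring_g → Spec_min_h_open_node exploring_list end_node exploring_g (min_h_open_node exploring_list end_node exploring_g)

-- ===== LEMMAS AND PROOFS =====

-- head of a stable sort = running "first strict minimum" of the list under the key
theorem pvHeadSorted {α κ : Type} [LinearOrder κ] (key : α → κ) (xs : List α) :
    (PySem.List.sorted xs key).head? =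
      (match xs with
       | [] => none
       | x :: t => some (t.foldl (fun b y => if key y < key b then y else b) x)) := by
  induction xs using List.reverseRecOn with
  | nil =>
    rw [(PySem.List.sorted_eq_nil_iff ([] : List α) key false).mpr rfl]
    rfl
  | append_singleton xs x ih =>
    rw [PySem.List.sorted_eq_foldl_insertBy, List.foldl_append] at *
    rw [List.foldl_cons, List.foldl_nil]
    cases hs : List.foldl (fun acc x => PySem.List.insertBy (fun a b => decide (key a < key b)) x acc) [] xs with
    | nil =>
      rw [hs] at ih
      have hxs : xs = [] := by
        have := (PySem.List.sorted_eq_nil_iff xs key false).mp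
          (by rw [PySem.List.sorted_eq_foldl_insertBy, hs])
        exact this
      subst hxs
      simp [PySem.List.insertBy]
    | cons m t =>
      rw [hs] at ih
      cases xs with
      | nil => simp at hs
      | cons x0 t0 =>
        simp only [List.head?_cons] at ih
        have hm : t0.foldl (fun b y => if key y < key b then y else b) x0 = m := by
          exact Option.some.inj ih.symm
        simp only [List.cons_append, List.foldl_append, List.foldl_cons, List.foldl_nil, hm]
        by_cases h : key x < key m
        · rw [if_pos h]
          simp [PySem.List.insertBy, h]
        · rw [if_neg h]
          simp [PySem.List.insertBy, h]

theorem pvHeadSortedCons {α κ : Type} [LinearOrder κ] (key : α → κ) (x : α) (t : List α) :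
    (PySem.List.sorted (x :: t) key).head? =
      some (t.foldl (fun b y => if key y < key b then y else b) x) :=
  pvHeadSorted key (x :: t)

-- running argmin over Nat indices (state = current best index; strict < so the first minimum wins)
def pvStepN (fs : List Int) (b i : Nat) : Nat := if fs.getD i 0 < fs.getD b 0 then i else b

theorem pvRangeArgmin (fs : List Int) : ∀ n : Nat, 0 < n → n ≤ fs.length →
    ∃ m, m ∈ fs.take n ∧ (∀ y ∈ fs.take n, m ≤ y) ∧
      (List.range n).foldl (pvStepN fs) 0 = (fs.take n).idxOf m := by
  intro n
  induction n with
  | zero => intro h; omega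
  | succ k ih =>
    intro _ hlen
    by_cases hk : k = 0
    · subst hk
      have h0 : 0 < fs.length := by omega
      refine ⟨fs[0], ?_, ?_, ?_⟩
      · simp [List.take_one, List.head?_eq_getElem?, List.getElem?_eq_getElem h0]
      · intro y hy
        simp [List.take_one, List.head?_eq_getElem?, List.getElem?_eq_getElem h0] at hy
        omega
      · simp [List.take_one, List.head?_eq_getElem?, List.getElem?_eq_getElem h0,
          List.range_succ, pvStepN]
    · obtain ⟨m, hmem, hmin, hidx⟩ := ih (Nat.pos_of_ne_zero hk) (by omega)
      have hkl : k < fs.length := by omega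
      have hjlt : (fs.take k).idxOf m < (fs.take k).length :=
        List.idxOf_lt_length_of_mem hmem
      have hlen_take : (fs.take k).length = k := by simp [List.length_take]; omega
      have hjfs : (fs.take k).idxOf m < fs.length := by omega
      have hgetj : fs.getD ((fs.take k).idxOf m) 0 = m := by
        rw [List.getD_eq_getElem fs 0 hjfs]
        have : fs[(fs.take k).idxOf m] = (fs.take k)[(fs.take k).idxOf m] := by
          rw [List.getElem_take]
        rw [this, List.getElem_idxOf hjlt]
      have htake : fs.take (k + 1) = fs.take k ++ [fs[k]] := by
        rw [List.take_succ, List.getElem?_eq_getElem hkl]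
        rfl
      rw [List.range_succ, List.foldl_append, List.foldl_cons, List.foldl_nil, hidx]
      unfold pvStepN
      rw [hgetj, List.getD_eq_getElem fs 0 hkl]
      by_cases hlt : fs[k] < m
      · refine ⟨fs[k], ?_, ?_, ?_⟩
        · rw [htake]; exact List.mem_append_right _ (List.mem_singleton.mpr rfl)
        · intro y hy
          rw [htake] at hy
          rcases List.mem_append.mp hy with h | h
          · exact le_of_lt (lt_of_lt_of_le hlt (hmin y h))
          · simp at h; omega
        · have hnot : fs[k] ∉ fs.take k := by
            intro hmemk
            exact absurd (hmin _ hmemk) (not_le.mpr hlt)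
          rw [if_pos hlt, htake, List.idxOf_append, if_neg hnot, List.idxOf_cons_self]
          omega
      · refine ⟨m, ?_, ?_, ?_⟩
        · rw [htake]; exact List.mem_append.mpr (Or.inl hmem)
        · intro y hy
          rw [htake] at hy
          rcases List.mem_append.mp hy with h | h
          · exact hmin y h
          · simp at h; omega
        · rw [if_neg hlt, htake, List.idxOf_append, if_pos hmem]

-- B's Int-valued fold over cast indices computes the Nat argmin fold
theorem pvFoldCast (key : Int → Int) (fs : List Int) (n : Nat)
    (hkey : ∀ j : Nat, j < n → key (j : Int) = fs.getD j 0) :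
    ∀ (l : List Nat) (b : Nat), b < n → (∀ j ∈ l, j < n) →
    (List.map (fun k : Nat => (k : Int)) l).foldl (fun bb y => if key y < key bb then y else bb) ((b : Nat) : Int)
      = ((l.foldl (pvStepN fs) b : Nat) : Int) := by
  intro l
  induction l with
  | nil => intro b _ _; simp
  | cons j t ih =>
    intro b hb hall
    have hj : j < n := hall j (List.mem_cons_self)
    simp only [List.map_cons, List.foldl_cons]
    rw [hkey j hj, hkey b hb]
    unfold pvStepN
    by_cases h : fs.getD j 0 < fs.getD b 0
    · rw [if_pos h, if_pos h]
      exact ih j hj (fun y hy => hall y (List.mem_cons_of_mem _ hy))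
    · rw [if_neg h, if_neg h]
      exact ih b hb (fun y hy => hall y (List.mem_cons_of_mem _ hy))

theorem pvIdxOf?_of_mem {l : List Int} {v : Int} (h : v ∈ l) :
    List.idxOf? v l = some (l.idxOf v) := by
  induction l with
  | nil => simp at h
  | cons x t ih =>
    by_cases hx : x = v
    · subst hx; simp [List.idxOf?_cons]
    · have hv : v ∈ t := by cases h with
        | head => exact absurd rfl hx
        | tail _ h => exact h
      simp [List.idxOf?_cons, hx, ih hv]

-- ===== VERDICT (by name: the statement is the Claim_ definition above) =====
theorem min_h_open_node_spec : Claim_equal_min_h_open_node := by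
  intro el en g _ hpre
  obtain ⟨hne, -⟩ := hpre
  obtain ⟨e, et, rfl⟩ : ∃ e et, el = e :: et := by
    cases el with
    | nil => exact absurd rfl hne
    | cons e et => exact ⟨e, et, rfl⟩
  unfold Spec_min_h_open_node min_h_open_node min_h_open_node_alt
  set f : (Int × Int) → Int := fun node => |node.1 - en.1| + |node.2 - en.2| + pvGval g node with hf
  set key : Int → Int := fun i =>
      |(PySem.List.pyGetD (e :: et) i (0, 0)).1 - en.1|
    + |(PySem.List.pyGetD (e :: et) i (0, 0)).2 - en.2|
    + pvGval g (PySem.List.pyGetD (e :: et) i (0, 0)) with hkey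
  set fs : List Int := (e :: et).map f with hfs
  have hn : 0 < (e :: et).length := by simp
  have hlfs : fs.length = (e :: et).length := by simp [hfs]
  -- B's key agrees with fs on in-range Nat indices
  have hkeyj : ∀ j : Nat, j < (e :: et).length → key (j : Int) = fs.getD j 0 := by
    intro j hj
    simp only [hkey, hfs, PySem.List.pyGetD_natCast]
    rw [List.getD_eq_getElem (e :: et) (0, 0) hj,
      List.getD_eq_getElem _ 0 (by simpa using hj), List.getElem_map]
  -- the argmin characterisation
  obtain ⟨m, hmem, hmin, hidx⟩ :=
    pvRangeArgmin fs (e :: et).length hn (le_of_eq hlfs.symm)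
  have htfs : List.take (e :: et).length fs = fs := List.take_of_length_le (le_of_eq hlfs)
  rw [htfs] at hmem hmin hidx
  -- B's head index
  have hhead :
      (PySem.List.sorted (PySem.List.pyRange 0 ((e :: et).length : Int)) key).head? =
        some ((fs.idxOf m : Nat) : Int) := by
    rw [show ((e :: et).length : Int) = ((et.length + 1 : Nat) : Int) by simp,
      PySem.List.pyRange_zero_natCast, List.range_succ_eq_map]
    simp only [List.map_cons, Nat.cast_zero]
    rw [pvHeadSortedCons]
    have hb := pvFoldCast key fs (e :: et).length hkeyj
      (List.map Nat.succ (List.range et.length)) 0 hn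
      (by intro j hj
          simp only [List.mem_map, List.mem_range] at hj
          obtain ⟨a, ha, rfl⟩ := hj
          simp
          omega)
    rw [show ((0 : Nat) : Int) = (0 : Int) by simp] at hb
    rw [hb]
    have hfold : (List.map Nat.succ (List.range et.length)).foldl (pvStepN fs) 0
        = (List.range (et.length + 1)).foldl (pvStepN fs) 0 := by
      rw [List.range_succ_eq_map, List.foldl_cons]
      have h0 : pvStepN fs 0 0 = 0 := by simp [pvStepN]
      rw [h0]
    rw [hfold, show et.length + 1 = (e :: et).length by simp, hidx]
  -- A's f_list, min and index
  rw [PySem.List.foldl_append_singleton_eq_map, List.nil_append]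
  have hflist : (e :: et).map (fun node => |node.1 - en.1| + |node.2 - en.2| + pvGval g node) = fs := by
    rw [hfs]
  rw [hflist]
  have hfs_cons : fs = f e :: et.map f := by simp [hfs]
  have hma : (et.map f).foldl min (f e) = m := by
    have h1 := PySem.List.foldl_min_le (et.map f) (f e)
    have h2 := PySem.List.foldl_min_mem (et.map f) (f e)
    have hmem2 : (et.map f).foldl min (f e) ∈ fs := by
      rw [hfs_cons]
      rcases h2 with h | h
      · rw [h]; exact List.mem_cons_self
      · exact List.mem_cons_of_mem _ h
    have hle1 : m ≤ (et.map f).foldl min (f e) := hmin _ hmem2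
    have hle2 : (et.map f).foldl min (f e) ≤ m := by
      rw [hfs_cons] at hmem
      rcases List.mem_cons.mp hmem with h | h
      · rw [h]; exact h1.1
      · exact h1.2 _ h
    omega
  have hminfs : PySem.List.min? fs (fun x => x) = some m := by
    rw [hfs_cons, PySem.List.min?_id_cons, hma]
  have hindex : PySem.List.index? fs m = some (fs.idxOf m) := by
    rw [PySem.List.index?_eq_idxOf?, pvIdxOf?_of_mem hmem]
  -- both sides pop the same index
  cases hsorted : PySem.List.sorted (PySem.List.pyRange 0 (((e :: et) : List (Int × Int)).length : Int)) key with
  | nil =>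
    rw [hsorted] at hhead
    simp at hhead
  | cons i rest =>
    rw [hsorted] at hhead
    simp only [List.head?_cons, Option.some.injEq] at hhead
    subst hhead
    simp only [hminfs, hindex]
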